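-- pv_equiv track=rewrite | github.com/koba925/alds | atcoder/ABC089/C.py | solve
-- ===== SOURCE A (Python) =====
-- def solve(N, names):
--     def _solve(k, u, ans):
--         if u == 3:
--             return ans
--         if k == 5 or ans == 0:
--             return 0
--         return _solve(k + 1, u, ans) + _solve(k + 1, u + 1, ans * n[k])
--
--     n = []
--     for initial in ("M", "A", "R", "C", "H"):
--          n.append(len([name for name in names if name.startswith(initial)]))
--
--     # return _solve(0, 0, 1)
--
--     ans = 0
--     for i in range(len(n) - 2):
--         for j in range(i + 1, len(n) - 1):
--             for k in range(j + 1, len(n)):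
--                 ans += n[i] * n[j] * n[k]
--     return ans
-- ===== SOURCE B (Python) =====
-- def solve(N, names):
--     counts = []
--     for initial in ("M", "A", "R", "C", "H"):
--         c = 0
--         for name in names:
--             if name.startswith(initial):
--                 c += 1
--         counts.append(c)
--     p1 = sum(counts)
--     p2 = sum(x * x for x in counts)
--     p3 = sum(x * x * x for x in counts)
--     # elementary symmetric polynomial e3 via Newton's identity (always exact)
--     return (p1 ** 3 - 3 * p1 * p2 + 2 * p3) // 6
-- ===== Notes on version B (the rewrite author's own statement) =====
-- stated objective: alternative
-- what changed: Replaces the triple nested loop over group indices with a closed-form Newton-identity combination (p1^3-3*p1*p2+2*p3)//6 of three power sums of the five group counts.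
import Mathlib
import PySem

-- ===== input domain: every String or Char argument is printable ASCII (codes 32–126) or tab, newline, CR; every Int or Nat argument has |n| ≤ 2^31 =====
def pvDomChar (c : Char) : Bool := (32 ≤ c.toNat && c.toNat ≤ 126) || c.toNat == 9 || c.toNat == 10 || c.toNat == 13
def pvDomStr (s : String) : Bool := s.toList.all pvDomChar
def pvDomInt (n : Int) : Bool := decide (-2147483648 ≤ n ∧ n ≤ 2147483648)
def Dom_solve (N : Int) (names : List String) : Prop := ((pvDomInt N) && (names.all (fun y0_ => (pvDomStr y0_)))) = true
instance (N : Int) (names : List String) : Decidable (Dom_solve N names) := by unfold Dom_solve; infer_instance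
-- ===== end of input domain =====

-- B replaces A's triple nested loop over the five group counts by the closed-form
-- Newton-identity expression (p1^3 - 3*p1*p2 + 2*p3)//6 of three power sums (alternative, not claimed faster).

-- ===== PORT A =====
def solve (N : Int) (names : List String) : Int :=
  let n : List Int :=
    ["M", "A", "R", "C", "H"].foldl
      (fun acc initial =>
        acc ++ [((names.filter (fun name => PySem.Str.startswith name initial)).length : Int)]) []
  (PySem.List.pyRange 0 ((n.length : Int) - 2) 1).foldl (fun ans i =>
    (PySem.List.pyRange (i + 1) ((n.length : Int) - 1) 1).foldl (fun ans j =>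
      (PySem.List.pyRange (j + 1) (n.length : Int) 1).foldl (fun ans k =>
        ans + PySem.List.pyGetD n i 0 * PySem.List.pyGetD n j 0 * PySem.List.pyGetD n k 0)
        ans) ans) 0

-- ===== PORT B =====
def solve_alt (N : Int) (names : List String) : Int :=
  let counts : List Int :=
    ["M", "A", "R", "C", "H"].foldl
      (fun acc initial =>
        acc ++ [names.foldl (fun c name => if PySem.Str.startswith name initial then c + 1 else c) (0 : Int)]) []
  let p1 : Int := counts.sum
  let p2 : Int := (counts.map (fun x => x * x)).sum
  let p3 : Int := (counts.map (fun x => x * x * x)).sum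
  PySem.Int.floordiv (p1 ^ 3 - 3 * p1 * p2 + 2 * p3) 6

-- ===== PRECONDITION & SPEC =====
def Spec_solve (N : Int) (names : List String) (out : Int) : Prop := out = solve_alt N names
instance (N : Int) (names : List String) (out : Int) : Decidable (Spec_solve N names out) := by unfold Spec_solve; infer_instance

-- ===== CLAIM (what is proved, stated in full; the proofs are below) =====
def Claim_equal_solve : Prop := ∀ (N : Int) (names : List String), Dom_solve N names → Spec_solve N names (solve N names)

-- ===== LEMMAS AND PROOFS =====

-- B's running count equals A's filtered-list length, for any predicate.
theorem cnt_eq {f : String → Bool} (names : List String) (c : Int) :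
    names.foldl (fun c name => if f name then c + 1 else c) c
      = c + ((names.filter f).length : Int) := by
  induction names generalizing c with
  | nil => simp
  | cons x xs ih =>
    rw [List.foldl_cons, List.filter_cons]
    by_cases h : f x = true
    · rw [if_pos h, if_pos h, ih, List.length_cons]; push_cast; ring
    · rw [if_neg h, if_neg h, ih]

-- The triple loop over [a,b,c,d,e] computes the degree-3 elementary symmetric polynomial …
theorem loop_eq (a b c d e : Int) :
    (PySem.List.pyRange 0 (((([a, b, c, d, e] : List Int).length : Int)) - 2) 1).foldl (fun ans i =>
      (PySem.List.pyRange (i + 1) ((([a, b, c, d, e] : List Int).length : Int) - 1) 1).foldl (fun ans j =>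
        (PySem.List.pyRange (j + 1) (([a, b, c, d, e] : List Int).length : Int) 1).foldl (fun ans k =>
          ans + PySem.List.pyGetD [a, b, c, d, e] i 0 * PySem.List.pyGetD [a, b, c, d, e] j 0
              * PySem.List.pyGetD [a, b, c, d, e] k 0) ans) ans) 0
    = a*b*c + a*b*d + a*b*e + a*c*d + a*c*e + a*d*e + b*c*d + b*c*e + b*d*e + c*d*e := by
  have g0 : PySem.List.pyGetD [a,b,c,d,e] 0 0 = a := by simp [PySem.List.pyGetD, PySem.List.pyGet?, PySem.List.pyIdx?]
  have g1 : PySem.List.pyGetD [a,b,c,d,e] 1 0 = b := by simp [PySem.List.pyGetD, PySem.List.pyGet?, PySem.List.pyIdx?]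
  have g2 : PySem.List.pyGetD [a,b,c,d,e] 2 0 = c := by simp [PySem.List.pyGetD, PySem.List.pyGet?, PySem.List.pyIdx?]
  have g3 : PySem.List.pyGetD [a,b,c,d,e] 3 0 = d := by simp [PySem.List.pyGetD, PySem.List.pyGet?, PySem.List.pyIdx?]
  have g4 : PySem.List.pyGetD [a,b,c,d,e] 4 0 = e := by simp [PySem.List.pyGetD, PySem.List.pyGet?, PySem.List.pyIdx?]
  norm_num [List.foldl_cons, List.foldl_nil, g0, g1, g2, g3, g4,
    show PySem.List.pyRange 0 3 1 = [0,1,2] from by decide,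
    show PySem.List.pyRange 1 4 1 = [1,2,3] from by decide,
    show PySem.List.pyRange 2 4 1 = [2,3] from by decide,
    show PySem.List.pyRange 3 4 1 = [3] from by decide,
    show PySem.List.pyRange 2 5 1 = [2,3,4] from by decide,
    show PySem.List.pyRange 3 5 1 = [3,4] from by decide,
    show PySem.List.pyRange 4 5 1 = [4] from by decide]

-- … and so does B's Newton-identity closed form (the division by 6 is exact).
theorem newton_eq (a b c d e : Int) :
    PySem.Int.floordiv ((a + (b + (c + (d + e)))) ^ 3
        - 3 * (a + (b + (c + (d + e)))) * (a*a + (b*b + (c*c + (d*d + e*e))))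
        + 2 * (a*a*a + (b*b*b + (c*c*c + (d*d*d + e*e*e))))) 6
    = a*b*c + a*b*d + a*b*e + a*c*d + a*c*e + a*d*e + b*c*d + b*c*e + b*d*e + c*d*e := by
  have hX : (a + (b + (c + (d + e)))) ^ 3
        - 3 * (a + (b + (c + (d + e)))) * (a*a + (b*b + (c*c + (d*d + e*e))))
        + 2 * (a*a*a + (b*b*b + (c*c*c + (d*d*d + e*e*e))))
      = 6 * (a*b*c + a*b*d + a*b*e + a*c*d + a*c*e + a*d*e + b*c*d + b*c*e + b*d*e + c*d*e) := by
    ring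
  rw [hX, PySem.Int.floordiv_eq_ediv_of_pos (by norm_num)]
  exact Int.mul_ediv_cancel_left _ (by norm_num)

-- ===== VERDICT (by name: the statement is the Claim_ definition above) =====
theorem solve_spec : Claim_equal_solve := by
  intro N names _
  unfold Spec_solve solve solve_alt
  simp only [List.foldl_cons, List.foldl_nil, List.nil_append, List.cons_append]
  rw [cnt_eq names 0, cnt_eq names 0, cnt_eq names 0, cnt_eq names 0, cnt_eq names 0]
  simp only [zero_add, List.sum_cons, List.sum_nil, List.map_cons, List.map_nil, add_zero]
  rw [loop_eq, newton_eq]
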